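-- pv_equiv track=rewrite | github.com/SciTools/iris | lib/iris/common/units/_pint.py | _make_unitstr_cftimelike
-- ===== SOURCE A (Python) =====
-- def _make_unitstr_cftimelike(units: str) -> str:
--     """Replace time-period symbols with names, to be more like cf_units."""
--     reps = {"s": "seconds", "m": "minutes", "h": "hours", "d": "days"}
--     for char, name in reps.items():
--         if units == char:
--             units = name
--         elif units.startswith(char + " "):
--             units = units.replace(char + " ", name + " ", 1)
--     return units
-- ===== SOURCE B (Python) =====
-- def _make_unitstr_cftimelike(units: str) -> str:
--     """Replace time-period symbols with names, to be more like cf_units."""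
--     reps = {"s": "seconds", "m": "minutes", "h": "hours", "d": "days"}
--     if units in reps:
--         return reps[units]
--     head, sep, tail = units.partition(" ")
--     if sep and head in reps:
--         return reps[head] + " " + tail
--     return units
-- ===== Notes on version B (the rewrite author's own statement) =====
-- stated objective: simpler
-- what changed: Replaces A's loop over all four symbol keys with startswith tests and a count-limited str.replace by one whole-string dict membership test plus a single str.partition on the first space and one head-token dict lookup.
import Mathlib
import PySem

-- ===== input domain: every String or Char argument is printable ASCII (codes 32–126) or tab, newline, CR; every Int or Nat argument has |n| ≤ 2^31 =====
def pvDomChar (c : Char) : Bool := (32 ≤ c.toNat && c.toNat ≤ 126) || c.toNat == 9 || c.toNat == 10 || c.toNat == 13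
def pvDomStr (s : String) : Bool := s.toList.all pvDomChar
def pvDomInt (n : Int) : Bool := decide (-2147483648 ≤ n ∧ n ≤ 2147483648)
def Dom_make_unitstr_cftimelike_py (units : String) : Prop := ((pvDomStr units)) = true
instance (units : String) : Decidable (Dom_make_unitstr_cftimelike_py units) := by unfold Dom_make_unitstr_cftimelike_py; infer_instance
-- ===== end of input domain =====

-- B replaces A's four-way startswith/replace loop by one head-token lookup via str.partition; objective: simpler.

-- ===== PORT A =====
-- Python s.replace(old, new, 1) for nonempty old: scan left to right, splice at the
-- first occurrence of old (hand-written; exact for old ≠ "", the only way A calls it).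
def pvReplace1 (s old new : List Char) : List Char :=
  match s with
  | [] => []
  | c :: rest =>
    if old.isPrefixOf (c :: rest) then new ++ (c :: rest).drop old.length
    else c :: pvReplace1 rest old new

def make_unitstr_cftimelike_py (units : String) : String :=
  let reps : PySem.Dict (List Char) (List Char) :=
    PySem.Dict.mk [("s".toList, "seconds".toList), ("m".toList, "minutes".toList),
     ("h".toList, "hours".toList), ("d".toList, "days".toList)]
  String.ofList <| reps.items.foldl (fun u cn =>
    if u = cn.1 then cn.2
    else if PySem.Chars.startswith u (cn.1 ++ [' ']) then
      pvReplace1 u (cn.1 ++ [' ']) (cn.2 ++ [' '])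
    else u) units.toList

-- ===== PORT B =====
-- Python units.partition(" "): (part before first space, the separator if found, rest).
def pvPartitionSpace (s : List Char) : List Char × List Char × List Char :=
  match s with
  | [] => ([], [], [])
  | c :: rest =>
    if c = ' ' then ([], [' '], rest)
    else
      let p := pvPartitionSpace rest
      (c :: p.1, p.2.1, p.2.2)

def make_unitstr_cftimelike_py_alt (units : String) : String :=
  let reps : PySem.Dict (List Char) (List Char) :=
    PySem.Dict.mk [("s".toList, "seconds".toList), ("m".toList, "minutes".toList),
     ("h".toList, "hours".toList), ("d".toList, "days".toList)]
  match reps.get? units.toList with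
  | some name => String.ofList name
  | none =>
    let p := pvPartitionSpace units.toList
    if p.2.1 ≠ [] then
      match reps.get? p.1 with
      | some name => String.ofList (name ++ [' '] ++ p.2.2)
      | none => units
    else units

-- ===== PRECONDITION & SPEC =====
def Spec_make_unitstr_cftimelike_py (units : String) (out : String) : Prop := out = make_unitstr_cftimelike_py_alt units
instance (units : String) (out : String) : Decidable (Spec_make_unitstr_cftimelike_py units out) := by unfold Spec_make_unitstr_cftimelike_py; infer_instance

-- ===== CLAIM (what is proved, stated in full; the proofs are below) =====
def Claim_equal_make_unitstr_cftimelike_py : Prop := ∀ (units : String), Dom_make_unitstr_cftimelike_py units → Spec_make_unitstr_cftimelike_py units (make_unitstr_cftimelike_py units)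

-- ===== LEMMAS AND PROOFS =====

theorem pv_main (cs : List Char) :
    make_unitstr_cftimelike_py (String.ofList cs) = make_unitstr_cftimelike_py_alt (String.ofList cs) := by
  cases cs with
  | nil => rfl
  | cons c tail =>
    cases tail with
    | nil =>
      by_cases hs : c = 's'
      · subst hs; rfl
      · by_cases hm : c = 'm'
        · subst hm; rfl
        · by_cases hh : c = 'h'
          · subst hh; rfl
          · by_cases hd : c = 'd'
            · subst hd; rfl
            · by_cases hsp : c = ' '
              · subst hsp; rfl
              · have bs : ('s' == c) = false := beq_eq_false_iff_ne.mpr (Ne.symm hs); have bm : ('m' == c) = false := beq_eq_false_iff_ne.mpr (Ne.symm hm); have bh : ('h' == c) = false := beq_eq_false_iff_ne.mpr (Ne.symm hh); have bd : ('d' == c) = false := beq_eq_false_iff_ne.mpr (Ne.symm hd); simp [make_unitstr_cftimelike_py, make_unitstr_cftimelike_py_alt,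
                  PySem.Dict.get?, PySem.Chars.startswith, pvReplace1, List.cons_beq_cons,
                  List.isPrefixOf, List.cons_prefix_cons, pvPartitionSpace, List.find?, hs, hm, hh, hd, hsp, bs, bm, bh, bd,
                  Ne.symm hs, Ne.symm hm, Ne.symm hh, Ne.symm hd, Ne.symm hsp]
    | cons d rest =>
      by_cases hd2 : d = ' '
      · subst hd2
        by_cases hs : c = 's'
        · subst hs; simp [make_unitstr_cftimelike_py, make_unitstr_cftimelike_py_alt,
                  PySem.Dict.get?, PySem.Chars.startswith, pvReplace1, List.cons_beq_cons,
                  List.isPrefixOf, List.cons_prefix_cons, pvPartitionSpace, List.find?]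
        · by_cases hm : c = 'm'
          · subst hm; simp [make_unitstr_cftimelike_py, make_unitstr_cftimelike_py_alt,
                  PySem.Dict.get?, PySem.Chars.startswith, pvReplace1, List.cons_beq_cons,
                  List.isPrefixOf, List.cons_prefix_cons, pvPartitionSpace, List.find?]
          · by_cases hh : c = 'h'
            · subst hh; simp [make_unitstr_cftimelike_py, make_unitstr_cftimelike_py_alt,
                  PySem.Dict.get?, PySem.Chars.startswith, pvReplace1, List.cons_beq_cons,
                  List.isPrefixOf, List.cons_prefix_cons, pvPartitionSpace, List.find?]
            · by_cases hd : c = 'd'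
              · subst hd; simp [make_unitstr_cftimelike_py, make_unitstr_cftimelike_py_alt,
                  PySem.Dict.get?, PySem.Chars.startswith, pvReplace1, List.cons_beq_cons,
                  List.isPrefixOf, List.cons_prefix_cons, pvPartitionSpace, List.find?]
              · by_cases hsp : c = ' '
                · subst hsp; simp [make_unitstr_cftimelike_py, make_unitstr_cftimelike_py_alt,
                  PySem.Dict.get?, PySem.Chars.startswith, pvReplace1, List.cons_beq_cons,
                  List.isPrefixOf, List.cons_prefix_cons, pvPartitionSpace, List.find?]
                · have bs : ('s' == c) = false := beq_eq_false_iff_ne.mpr (Ne.symm hs); have bm : ('m' == c) = false := beq_eq_false_iff_ne.mpr (Ne.symm hm); have bh : ('h' == c) = false := beq_eq_false_iff_ne.mpr (Ne.symm hh); have bd : ('d' == c) = false := beq_eq_false_iff_ne.mpr (Ne.symm hd); simp [make_unitstr_cftimelike_py, make_unitstr_cftimelike_py_alt,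
                  PySem.Dict.get?, PySem.Chars.startswith, pvReplace1, List.cons_beq_cons,
                  List.isPrefixOf, List.cons_prefix_cons, pvPartitionSpace, List.find?, hs, hm, hh, hd, hsp, bs, bm, bh, bd,
                  Ne.symm hs, Ne.symm hm, Ne.symm hh, Ne.symm hd, Ne.symm hsp]
      · by_cases hsp : c = ' '
        · subst hsp; simp [make_unitstr_cftimelike_py, make_unitstr_cftimelike_py_alt,
                  PySem.Dict.get?, PySem.Chars.startswith, pvReplace1, List.cons_beq_cons,
                  List.isPrefixOf, List.cons_prefix_cons, pvPartitionSpace, List.find?, hd2, Ne.symm hd2]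
        · simp [make_unitstr_cftimelike_py, make_unitstr_cftimelike_py_alt,
                  PySem.Dict.get?, PySem.Chars.startswith, pvReplace1, List.cons_beq_cons,
                  List.isPrefixOf, List.cons_prefix_cons, pvPartitionSpace, List.find?, hd2, hsp, Ne.symm hd2, Ne.symm hsp]

-- ===== VERDICT (by name: the statement is the Claim_ definition above) =====
theorem make_unitstr_cftimelike_py_spec : Claim_equal_make_unitstr_cftimelike_py := by
  intro units _
  show _ = _
  have := pv_main units.toList
  simpa using this
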